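-- pv_equiv track=rewrite | github.com/xtraman297/GuitarPracticeTool | PracticeTool.py | print_tab_3_per_string
-- ===== SOURCE A (Python) =====
-- STRINGS_ON_GUITAR = 6
--
-- def print_tab_3_per_string(list):
--     note_tab_arr = ["e", "B", "G", "D", "A", "E"]
--     #some_string = ''
--     some_array = []
--     for i in range(0, 6):
--         some_array.append(note_tab_arr[i])
--         some_array.append("|---")
--
--         for aft in range(i, STRINGS_ON_GUITAR-1):
--                 for z in list[aft]:
--                     some_array.append("----")
--         for x in list[i]:
--             if x == -1:
--                 some_array.append("---")
--             else:
--                 some_array.append(str(x))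
--             if x < 10:
--                 some_array.append("---")
--             else:
--                 some_array.append("--")
--         for bef in range(0, i):
--                 for z in list[bef]:
--                     some_array.append("----")
--         some_array.append("\n")
--     some_string = "".join(some_array)
--
--     return some_string[:-1] # [:-1] -> Removing last \n
-- ===== SOURCE B (Python) =====
-- def print_tab_3_per_string(list):
--     names = ["e", "B", "G", "D", "A", "E"]
--     counts = [len(list[k]) for k in range(6)]
--     rendered = ["".join(("---" if x == -1 else str(x)) + ("---" if x < 10 else "--")
--                         for x in list[k]) for k in range(6)]
--     rows = []
--     for i in range(6):
--         aft = sum(counts[i:5])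
--         bef = sum(counts[:i])
--         rows.append(names[i] + "|---" + "----" * aft + rendered[i] + "----" * bef)
--     return "\n".join(rows)
-- ===== Notes on version B (the rewrite author's own statement) =====
-- stated objective: simpler
-- what changed: A interleaves six nested re-scans of the note lists while emitting one flat token array and strips a trailing newline; B precomputes per-string counts and rendered note blocks in one pass, then assembles each row from slice sums and string repetition and joins the rows with '\n'.
import Mathlib
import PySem

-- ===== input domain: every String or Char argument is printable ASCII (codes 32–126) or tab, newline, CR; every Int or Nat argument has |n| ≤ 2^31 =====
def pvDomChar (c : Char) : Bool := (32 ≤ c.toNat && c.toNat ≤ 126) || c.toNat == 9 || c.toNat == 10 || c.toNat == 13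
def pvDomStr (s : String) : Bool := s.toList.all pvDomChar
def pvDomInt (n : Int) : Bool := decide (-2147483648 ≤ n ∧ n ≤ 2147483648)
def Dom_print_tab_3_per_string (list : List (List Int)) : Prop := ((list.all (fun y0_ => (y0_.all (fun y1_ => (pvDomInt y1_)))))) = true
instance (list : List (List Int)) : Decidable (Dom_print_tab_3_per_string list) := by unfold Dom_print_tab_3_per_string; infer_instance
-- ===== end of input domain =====

-- B replaces A's nested re-scans of the six note lists by one precompute pass
-- (per-string note counts and rendered note blocks) and a simple row-assembly pass
-- joined with "\n" (objective: simpler decomposition, same asymptotic cost).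

-- ===== PORT A =====
def print_tab_3_per_string (list : List (List Int)) : String :=
  let note_tab_arr : List String := ["e", "B", "G", "D", "A", "E"]
  let some_array : List String :=
    (PySem.List.pyRange 0 6 1).foldl (fun arr i =>
      let arr := arr ++ [PySem.List.pyGetD note_tab_arr i ""]
      let arr := arr ++ ["|---"]
      let arr := (PySem.List.pyRange i 5 1).foldl (fun arr aft =>
          (PySem.List.pyGetD list aft []).foldl (fun arr _z => arr ++ ["----"]) arr) arr
      let arr := (PySem.List.pyGetD list i []).foldl (fun arr x =>
          let arr := arr ++ [if x = -1 then "---" else PySem.Int.toStr x]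
          arr ++ [if x < 10 then "---" else "--"]) arr
      let arr := (PySem.List.pyRange 0 i 1).foldl (fun arr bef =>
          (PySem.List.pyGetD list bef []).foldl (fun arr _z => arr ++ ["----"]) arr) arr
      arr ++ ["\n"]) []
  let some_string := PySem.Str.join "" some_array
  PySem.Str.slice some_string none (some (-1))

-- ===== PORT B =====
-- "----" * n  (Python string repetition; hand-ported: join of n copies — exact for n ≤ 0 too)
def pvStrMul (s : String) (n : Int) : String :=
  PySem.Str.join "" (List.replicate n.toNat s)

def print_tab_3_per_string_alt (list : List (List Int)) : String :=
  let names : List String := ["e", "B", "G", "D", "A", "E"]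
  let counts : List Int :=
    (PySem.List.pyRange 0 6 1).map (fun k => ((PySem.List.pyGetD list k []).length : Int))
  let rendered : List String :=
    (PySem.List.pyRange 0 6 1).map (fun k =>
      PySem.Str.join "" ((PySem.List.pyGetD list k []).map (fun x =>
        PySem.Str.join "" [if x = -1 then "---" else PySem.Int.toStr x,
                           if x < 10 then "---" else "--"])))
  let rows : List String :=
    (PySem.List.pyRange 0 6 1).foldl (fun rows i =>
      let aft := (PySem.List.slice counts (some i) (some 5)).sum
      let bef := (PySem.List.slice counts none (some i)).sum
      rows ++ [PySem.Str.join "" [PySem.List.pyGetD names i "", "|---",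
                                  pvStrMul "----" aft,
                                  PySem.List.pyGetD rendered i "",
                                  pvStrMul "----" bef]]) []
  PySem.Str.join "\n" rows

-- ===== PRECONDITION & SPEC =====
-- Pre_ excludes inputs with fewer than 6 inner lists, on which A raises IndexError (B does too).
def Pre_print_tab_3_per_string (list : List (List Int)) : Prop := 6 ≤ list.length
instance (list : List (List Int)) : Decidable (Pre_print_tab_3_per_string list) := by
  unfold Pre_print_tab_3_per_string; infer_instance

def pvWitness_print_tab_3_per_string : List (List Int) := [[0], [-1, 12], [], [3], [5], [7]]

def Spec_print_tab_3_per_string (list : List (List Int)) (out : String) : Prop := out = print_tab_3_per_string_alt list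
instance (list : List (List Int)) (out : String) : Decidable (Spec_print_tab_3_per_string list out) := by unfold Spec_print_tab_3_per_string; infer_instance

-- ===== CLAIM (what is proved, stated in full; the proofs are below) =====
def Claim_equal_print_tab_3_per_string : Prop := ∀ (list : List (List Int)), Dom_print_tab_3_per_string list → Pre_print_tab_3_per_string list → Spec_print_tab_3_per_string list (print_tab_3_per_string list)

-- ===== LEMMAS AND PROOFS =====

theorem join_nil_flatten (ps : List (List Char)) : PySem.Chars.join [] ps = ps.flatten := by
  induction ps with
  | nil => rfl
  | cons p rest ih =>
    cases rest with
    | nil => simp [PySem.Chars.join_singleton]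
    | cons q r => simp [PySem.Chars.join_cons_cons] at ih ⊢; simp [ih]

theorem flatMap_const_dash (l : List Int) :
    List.flatMap (fun _ => (["----"] : List String)) l = List.replicate l.length "----" := by
  induction l with
  | nil => rfl
  | cons x xs ih => simp [List.flatMap_cons, ih, List.replicate_succ]

theorem flatMap_pair_flatten (l : List Int) (p q : Int → String) :
    ((List.flatMap (fun x => [p x, q x]) l).map String.toList).flatten
      = (l.map (fun x => (p x).toList ++ (q x).toList)).flatten := by
  induction l with
  | nil => rfl
  | cons x xs ih =>
    simp only [List.flatMap_cons, List.map_cons, List.flatten_cons, List.cons_append,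
      List.nil_append, ih]
    simp [List.append_assoc]

theorem map_toList_join_pair (l : List Int) (p q : Int → String) :
    List.map String.toList (List.map (fun x => PySem.Str.join "" [p x, q x]) l)
      = List.map (fun x => (p x).toList ++ (q x).toList) l := by
  induction l with
  | nil => rfl
  | cons x xs ih =>
    simp only [List.map_cons, ih, PySem.Str.toList_join, List.map_nil,
      PySem.Chars.join_cons_cons, PySem.Chars.join_singleton, show "".toList = [] from rfl,
      List.append_nil]

theorem print_tab_3_per_string_equal (list : List (List Int))
    (h : 6 ≤ list.length) :
    print_tab_3_per_string list = print_tab_3_per_string_alt list := by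
  match list, h with
  | l0::l1::l2::l3::l4::l5::rest, _ => ?_

  simp only [print_tab_3_per_string, print_tab_3_per_string_alt]
  simp only [show PySem.List.pyRange 0 6 1 = [0,1,2,3,4,5] from rfl]
  simp only [List.foldl_cons, List.foldl_nil, List.map_cons, List.map_nil]
  simp only [show PySem.List.pyRange 1 5 1 = [1,2,3,4] from rfl,
      show PySem.List.pyRange 2 5 1 = [2,3,4] from rfl,
      show PySem.List.pyRange 3 5 1 = [3,4] from rfl,
      show PySem.List.pyRange 4 5 1 = [4] from rfl,
      show PySem.List.pyRange 5 5 1 = [] from rfl,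
      show PySem.List.pyRange 0 0 1 = ([] : List Int) from rfl,
      show PySem.List.pyRange 0 1 1 = [0] from rfl,
      show PySem.List.pyRange 0 2 1 = [0,1] from rfl,
      show PySem.List.pyRange 0 3 1 = [0,1,2] from rfl,
      show PySem.List.pyRange 0 4 1 = [0,1,2,3] from rfl,
      show PySem.List.pyRange 0 5 1 = [0,1,2,3,4] from rfl]
  simp only [List.foldl_cons, List.foldl_nil]
  simp only [PySem.List.pyGetD_ofNat', List.getD_cons_zero, List.getD_cons_succ]
  simp only [List.append_assoc]
  simp only [PySem.List.foldl_append_eq_flatMap]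
  apply String.toList_inj.mp
  simp only [PySem.Str.toList_slice, PySem.Str.toList_join,
    show "".toList = [] from rfl, show "\n".toList = ['\n'] from rfl]
  rw [show ∀ cs : List Char, PySem.Chars.slice cs none (some (-1)) = cs.dropLast from fun cs => PySem.List.slice_to_neg_one cs]
  simp only [join_nil_flatten]
  simp only [flatMap_const_dash, pvStrMul]
  simp only [show ∀ a b c d e f : Int, PySem.List.slice [a,b,c,d,e,f] (some 0) (some 5) = [a,b,c,d,e] from fun _ _ _ _ _ _ => rfl,
    show ∀ a b c d e f : Int, PySem.List.slice [a,b,c,d,e,f] (some 1) (some 5) = [b,c,d,e] from fun _ _ _ _ _ _ => rfl,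
    show ∀ a b c d e f : Int, PySem.List.slice [a,b,c,d,e,f] (some 2) (some 5) = [c,d,e] from fun _ _ _ _ _ _ => rfl,
    show ∀ a b c d e f : Int, PySem.List.slice [a,b,c,d,e,f] (some 3) (some 5) = [d,e] from fun _ _ _ _ _ _ => rfl,
    show ∀ a b c d e f : Int, PySem.List.slice [a,b,c,d,e,f] (some 4) (some 5) = [e] from fun _ _ _ _ _ _ => rfl,
    show ∀ a b c d e f : Int, PySem.List.slice [a,b,c,d,e,f] (some 5) (some 5) = [] from fun _ _ _ _ _ _ => rfl,
    show ∀ a b c d e f : Int, PySem.List.slice [a,b,c,d,e,f] none (some 0) = [] from fun _ _ _ _ _ _ => rfl,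
    show ∀ a b c d e f : Int, PySem.List.slice [a,b,c,d,e,f] none (some 1) = [a] from fun _ _ _ _ _ _ => rfl,
    show ∀ a b c d e f : Int, PySem.List.slice [a,b,c,d,e,f] none (some 2) = [a,b] from fun _ _ _ _ _ _ => rfl,
    show ∀ a b c d e f : Int, PySem.List.slice [a,b,c,d,e,f] none (some 3) = [a,b,c] from fun _ _ _ _ _ _ => rfl,
    show ∀ a b c d e f : Int, PySem.List.slice [a,b,c,d,e,f] none (some 4) = [a,b,c,d] from fun _ _ _ _ _ _ => rfl,
    show ∀ a b c d e f : Int, PySem.List.slice [a,b,c,d,e,f] none (some 5) = [a,b,c,d,e] from fun _ _ _ _ _ _ => rfl]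
  simp only [List.sum_cons, List.sum_nil, add_zero, ← Nat.cast_add, Int.toNat_natCast,
    Int.toNat_zero, List.replicate_add, List.replicate_zero]
  simp only [List.map_cons, List.map_nil, List.map_append, List.map_replicate,
    PySem.Chars.join_cons_cons, PySem.Chars.join_singleton, PySem.Str.toList_join,
    show "".toList = [] from rfl, join_nil_flatten,
    List.flatten_cons, List.flatten_nil, List.flatten_append,
    List.append_nil, List.nil_append, List.cons_append,
    map_toList_join_pair, flatMap_pair_flatten]
  simp only [List.append_assoc]
  simp [List.dropLast_append_of_ne_nil, List.dropLast_cons_of_ne_nil]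

-- ===== VERDICT (by name: the statement is the Claim_ definition above) =====
theorem print_tab_3_per_string_spec : Claim_equal_print_tab_3_per_string := by
  intro list _ hpre
  exact print_tab_3_per_string_equal list hpre
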